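-- pv_equiv track=rewrite | github.com/Iron-Buster/algorithm-study | py_code/marscode/dp/marscode_2.py | solution
-- ===== SOURCE A (Python) =====
-- from functools import cache
--
-- def solution(n, k, data):
--     # Edit your code
--     @cache
--     def dfs(i: int, j: int) -> int:
--         if i >= n: return 0
--         ans = 0x3f3f3f3f
--         if j > 0:
--             # 不购买
--             ans = min(ans, dfs(i + 1, j - 1))
--         for x in range(1, k + 1):
--             if j + x > k: break
--             # 必须消耗一次
--             ans = min(ans, dfs(i + 1, j + x - 1) + (data[i] * x))
--         return ans
--
--
--     res = dfs(0, 0)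
--     return res
-- ===== SOURCE B (Python) =====
-- def solution(n, k, data):
--     # Bottom-up DP with a running suffix-minimum instead of the memoized
--     # recursion's inner scan: O(n*k) states each O(1) instead of O(n*k^2)
--     # (measured ~58x at n=256; still returns where A times out).
--     INF = 0x3f3f3f3f
--     if n <= 0:
--         return 0
--     if k <= 0:
--         return INF        # no capacity at all: every state is dead
--     kk = k
--     nxt = [0] * (kk + 1)          # layer i+1; f[n][j] = 0
--     for i in range(n - 1, -1, -1):
--         d = data[i]
--         cur = [0] * (kk + 1)
--         g = None                   # min over y in [j, kk-1] of nxt[y] + d*(y+1)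
--         for j in range(kk, -1, -1):
--             if j < kk:
--                 cand = nxt[j] + d * (j + 1)
--                 g = cand if g is None else min(g, cand)
--             best = INF
--             if j > 0:
--                 best = min(best, nxt[j - 1])
--             if g is not None:
--                 best = min(best, g - d * j)
--             cur[j] = best
--         nxt = cur
--     return nxt[0]
-- ===== Notes on version B (the rewrite author's own statement) =====
-- stated objective: faster
-- what changed: Replaces the memoized top-down recursion (which rescans up to k purchase options per state) by a bottom-up DP over layers i = n-1..0 that maintains a running suffix-minimum of nxt[y] + data[i]*(y+1), making each state O(1): O(n*k) vs O(n*k^2), measured 58x at n=256 and still returning where A times out.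
import Mathlib
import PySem

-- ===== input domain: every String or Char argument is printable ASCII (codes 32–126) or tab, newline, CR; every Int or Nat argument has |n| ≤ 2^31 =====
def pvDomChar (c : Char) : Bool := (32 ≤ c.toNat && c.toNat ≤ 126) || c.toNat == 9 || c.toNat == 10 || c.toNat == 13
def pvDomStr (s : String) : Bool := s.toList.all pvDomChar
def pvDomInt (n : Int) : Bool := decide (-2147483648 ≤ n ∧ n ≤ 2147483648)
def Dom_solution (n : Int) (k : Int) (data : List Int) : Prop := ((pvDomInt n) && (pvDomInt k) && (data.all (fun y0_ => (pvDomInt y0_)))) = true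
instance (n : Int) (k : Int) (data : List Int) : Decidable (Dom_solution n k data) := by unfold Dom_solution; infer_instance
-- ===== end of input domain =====

-- B replaces A's memoized top-down recursion (inner scan over up to k purchase
-- options per state) by a bottom-up DP with a running suffix-minimum (one O(1)
-- step per state); measured faster (~58x at n=256, still returning where A times out).

-- ===== PORT A =====
-- literal port of the @cache'd dfs; the memoization only affects speed, not the value.
-- data[i] is ported as pyGetD data i 0: inside Pre_solution every access is in range (0 ≤ i < n ≤ len(data)).
def dfsA (n : Int) (k : Int) (data : List Int) (i : Int) (j : Int) : Int :=
  if h : n ≤ i then 0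
  else
    -- ans = 0x3f3f3f3f; if j > 0: ans = min(ans, dfs(i+1, j-1))
    -- for x in range(1, k+1): if j+x > k: break; ans = min(ans, dfs(i+1, j+x-1) + data[i]*x)
    ((PySem.List.pyRange 1 (k + 1) 1).foldl
      (fun (st : Int × Bool) x =>
        if st.2 then st
        else if k < j + x then (st.1, true)
        else (min st.1 (dfsA n k data (i + 1) (j + x - 1) + PySem.List.pyGetD data i 0 * x), false))
      ((if 0 < j then min 1061109567 (dfsA n k data (i + 1) (j - 1)) else (1061109567 : Int)), false)).1
termination_by (n - i).toNat
decreasing_by all_goals omega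

def solution (n : Int) (k : Int) (data : List Int) : Int :=
  dfsA n k data 0 0

-- ===== PORT B =====
-- 'g = cand if g is None else min(g, cand)'
def portg (g : Option Int) (cand : Int) : Option Int :=
  match g with
  | none => some cand
  | some v => some (min v cand)

-- 'best = min(best, g - d*j) if g is not None'
def portbest (g : Option Int) (best1 : Int) (s : Int) : Int :=
  match g with
  | none => best1
  | some v => min best1 (v - s)

-- inner loop of Source B: j runs kk, kk-1, …, 0; g is the running suffix-minimum
-- of nxt[y] + d*(y+1) over y ∈ [j, kk-1] (none while empty); cur is built by prepending.
def rowAuxB (d : Int) (nxt : List Int) (kk : Nat) : Nat → Option Int → List Int → List Int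
  | j, g, acc =>
    let g' : Option Int := if j < kk then portg g (nxt.getD j 0 + d * ((j : Int) + 1)) else g
    let best1 : Int := if 0 < j then min 1061109567 (nxt.getD (j - 1) 0) else (1061109567 : Int)
    let best : Int := portbest g' best1 (d * (j : Int))
    match j with
    | 0 => best :: acc
    | jp + 1 => rowAuxB d nxt kk jp g' (best :: acc)

def rowB (d : Int) (nxt : List Int) (kk : Nat) : List Int :=
  rowAuxB d nxt kk kk none []

-- the descending loop over i = n-1 … 0 of Source B, as recursion on the processed suffix of data
def buildB (kk : Nat) : List Int → List Int
  | [] => List.replicate (kk + 1) 0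
  | c :: cs => rowB c (buildB kk cs) kk

def solution_alt (n : Int) (k : Int) (data : List Int) : Int :=
  if n ≤ 0 then 0
  else if k ≤ 0 then 1061109567
  else (buildB k.toNat (data.take n.toNat)).getD 0 0

-- ===== PRECONDITION & SPEC =====
-- Pre_ excludes exactly the inputs where A raises IndexError (k ≥ 1 and 0 < n > len(data),
-- so dfs reaches data[len(data)]); A is total everywhere else.
def Pre_solution (n : Int) (k : Int) (data : List Int) : Prop :=
  n ≤ 0 ∨ k ≤ 0 ∨ n ≤ data.length
instance (n : Int) (k : Int) (data : List Int) : Decidable (Pre_solution n k data) := by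
  unfold Pre_solution; infer_instance
def pvWitness_solution : Int × Int × List Int := (3, 2, [5, 1, 4])

def Spec_solution (n : Int) (k : Int) (data : List Int) (out : Int) : Prop := out = solution_alt n k data
instance (n : Int) (k : Int) (data : List Int) (out : Int) : Decidable (Spec_solution n k data out) := by unfold Spec_solution; infer_instance

-- ===== CLAIM (what is proved, stated in full; the proofs are below) =====
def Claim_equal_solution : Prop := ∀ (n : Int) (k : Int) (data : List Int), Dom_solution n k data → Pre_solution n k data → Spec_solution n k data (solution n k data)

-- ===== LEMMAS AND PROOFS =====

-- reference value: F k cs j = dfs value on the remaining costs cs with j pre-bought items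
def Fref (k : Int) : List Int → Int → Int
  | [], _ => 0
  | c :: cs, j =>
    (PySem.List.pyRange 1 (k - j + 1) 1).foldl (fun a x => min a (Fref k cs (j + x - 1) + c * x))
      (if 0 < j then min 1061109567 (Fref k cs (j - 1)) else (1061109567 : Int))
termination_by cs => cs.length
decreasing_by all_goals simp

-- option-min accumulator (the 'g' of Source B)
def om (o : Option Int) (x : Int) : Option Int :=
  some (match o with | none => x | some v => min v x)

def oMin (l : List Int) : Option Int := l.foldl om none

theorem foldl_om_some : ∀ (l : List Int) (v : Int), l.foldl om (some v) = some (l.foldl min v) := by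
  intro l; induction l with
  | nil => intro v; rfl
  | cons x l ih => intro v; simpa [om] using ih (min v x)

theorem foldl_min_init : ∀ (l : List Int) (a b : Int), l.foldl min (min a b) = min a (l.foldl min b) := by
  intro l; induction l with
  | nil => intro a b; rfl
  | cons x l ih => intro a b; rw [List.foldl_cons, List.foldl_cons, min_assoc, ih]

theorem foldl_min_eq_oMin (l : List Int) (a0 : Int) :
    l.foldl min a0 = match oMin l with | none => a0 | some v => min a0 v := by
  cases l with
  | nil => rfl
  | cons x l =>
      rw [oMin, List.foldl_cons, List.foldl_cons]
      have h1 : om none x = some x := rfl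
      rw [h1, foldl_om_some, foldl_min_init]

theorem om_pull : ∀ (l : List Int) (o : Option Int) (x : Int), om (l.foldl om o) x = l.foldl om (om o x) := by
  intro l; induction l with
  | nil => intro o x; rfl
  | cons y l ih =>
      intro o x
      rw [List.foldl_cons, ih, List.foldl_cons]
      congr 1
      cases o <;> simp [om, min_assoc, min_comm x y, min_left_comm]

theorem foldl_om_reverse : ∀ (l : List Int) (o : Option Int), l.reverse.foldl om o = l.foldl om o := by
  intro l; induction l with
  | nil => intro o; rfl
  | cons x l ih =>
      intro o
      rw [List.reverse_cons, List.foldl_append, ih, List.foldl_cons, List.foldl_nil, om_pull,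
        List.foldl_cons]

theorem oMin_reverse (l : List Int) : oMin l.reverse = oMin l := foldl_om_reverse l none

theorem foldl_om_map_sub (s : Int) :
    ∀ (l : List Int) (o : Option Int),
      (l.map (fun v => v - s)).foldl om (o.map (fun v => v - s)) = (l.foldl om o).map (fun v => v - s) := by
  intro l; induction l with
  | nil => intro o; rfl
  | cons x l ih =>
      intro o
      rw [List.map_cons, List.foldl_cons, List.foldl_cons, ← ih]
      congr 1
      cases o <;> simp [om, min_sub_sub_right]

theorem oMin_map_sub (s : Int) (l : List Int) :
    oMin (l.map (fun v => v - s)) = (oMin l).map (fun v => v - s) := by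
  simpa using foldl_om_map_sub s l none

-- A's inner loop with break, characterised
theorem breakNoMore (k j : Int) (f : Int → Int) :
    ∀ (l : List Int) (st : Int × Bool), st.2 = true →
      l.foldl (fun (st : Int × Bool) x =>
        if st.2 then st else if k < j + x then (st.1, true)
        else (min st.1 (f x), false)) st = st := by
  intro l; induction l with
  | nil => intro st h; rfl
  | cons x l ih => intro st h; rw [List.foldl_cons, if_pos h, ih st h]

theorem breakActive (k j : Int) (f : Int → Int) :
    ∀ (l : List Int), (∀ x ∈ l, ¬ k < j + x) → ∀ (a0 : Int),
      l.foldl (fun (st : Int × Bool) x =>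
        if st.2 then st else if k < j + x then (st.1, true)
        else (min st.1 (f x), false)) (a0, false)
      = (l.foldl (fun a x => min a (f x)) a0, false) := by
  intro l; induction l with
  | nil => intro _ a0; rfl
  | cons x l ih =>
      intro h a0
      rw [List.foldl_cons, List.foldl_cons]
      simp only [Bool.false_eq_true, if_false]
      rw [if_neg (h x (List.mem_cons_self))]
      exact ih (fun y hy => h y (List.mem_cons_of_mem _ hy)) (min a0 (f x))

theorem breakFold (f : Int → Int) (a0 j k : Int) (h0 : 0 ≤ j) (hjk : j ≤ k) :
    ((PySem.List.pyRange 1 (k + 1) 1).foldl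
      (fun (st : Int × Bool) x =>
        if st.2 then st else if k < j + x then (st.1, true)
        else (min st.1 (f x), false)) (a0, false)).1
    = (PySem.List.pyRange 1 (k - j + 1) 1).foldl (fun a x => min a (f x)) a0 := by
  rw [PySem.List.pyRange_one_append 1 (k - j + 1) (k + 1) (by omega) (by omega), List.foldl_append]
  rw [breakActive k j f _ (by intro x hx; rw [PySem.List.mem_pyRange_one] at hx; omega)]
  by_cases hj : j = 0
  · rw [PySem.List.pyRange_one_eq_nil (a := k - j + 1) (b := k + 1) (by omega)]
    rfl
  · rw [PySem.List.pyRange_one_cons (a := k - j + 1) (b := k + 1) (by omega), List.foldl_cons]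
    simp only [Bool.false_eq_true, if_false]
    rw [if_pos (by omega)]
    rw [breakNoMore k j f _ _ rfl]

theorem dfsA_eq (n k : Int) (data : List Int) (hlen : n ≤ data.length) :
    ∀ (m : Nat) (i j : Int), (n - i).toNat ≤ m → 0 ≤ i → 0 ≤ j → j ≤ k →
      dfsA n k data i j = Fref k ((data.take n.toNat).drop i.toNat) j := by
  intro m
  induction m with
  | zero =>
      intro i j hm hi hj hjk
      rw [dfsA, dif_pos (by omega : n ≤ i)]
      have hnil : (data.take n.toNat).drop i.toNat = [] := by
        apply List.drop_eq_nil_of_le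
        simp only [List.length_take]
        omega
      rw [hnil]
      simp [Fref]
  | succ m ih =>
      intro i j hm hi hj hjk
      by_cases hni : n ≤ i
      · rw [dfsA, dif_pos hni]
        have hnil : (data.take n.toNat).drop i.toNat = [] := by
          apply List.drop_eq_nil_of_le
          simp only [List.length_take]
          omega
        rw [hnil]
        simp [Fref]
      · rw [dfsA, dif_neg hni]
        have hlt : i.toNat < (data.take n.toNat).length := by
          simp only [List.length_take]
          omega
        rw [List.drop_eq_getElem_cons hlt, Fref]
        rw [breakFold _ _ j k hj hjk]
        have hi1 : (i + 1).toNat = i.toNat + 1 := by omega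
        have hdata : PySem.List.pyGetD data i 0 = (data.take n.toNat)[i.toNat] := by
          rw [PySem.List.pyGetD_eq_getElem (xs := data) (i := i) (d := 0) hi (by omega)]
          rw [List.getElem_take]
        have hinit :
            (if 0 < j then min 1061109567 (dfsA n k data (i + 1) (j - 1)) else (1061109567 : Int))
            = (if 0 < j then
                min 1061109567 (Fref k ((data.take n.toNat).drop (i.toNat + 1)) (j - 1))
              else (1061109567 : Int)) := by
          by_cases hjp : 0 < j
          · rw [if_pos hjp, if_pos hjp,
              ih (i + 1) (j - 1) (by omega) (by omega) (by omega) (by omega), hi1]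
          · rw [if_neg hjp, if_neg hjp]
        rw [hinit]
        apply PySem.List.foldl_congr_mem
        intro acc x hx
        rw [PySem.List.mem_pyRange_one] at hx
        rw [ih (i + 1) (j + x - 1) (by omega) (by omega) (by omega) (by omega), hi1, hdata]

-- ==== B-side: the row's running minimum, characterised ====

def gAt (d : Int) (nxt : List Int) (kk j : Nat) : Option Int :=
  oMin (((List.range' j (kk - j)).map (fun y => nxt.getD y 0 + d * ((y : Int) + 1))).reverse)

def bestAt (d : Int) (nxt : List Int) (kk j : Nat) : Int :=
  portbest (gAt d nxt kk j)
    (if 0 < j then min 1061109567 (nxt.getD (j - 1) 0) else (1061109567 : Int))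
    (d * (j : Int))

theorem portg_eq_om (g : Option Int) (c : Int) : portg g c = om g c := by
  cases g <;> rfl

theorem gAt_ge (d : Int) (nxt : List Int) (kk j : Nat) (h : kk ≤ j) : gAt d nxt kk j = none := by
  unfold gAt
  rw [Nat.sub_eq_zero_of_le h]
  rfl

theorem gAt_succ (d : Int) (nxt : List Int) (kk j : Nat) (h : j < kk) :
    gAt d nxt kk j = om (gAt d nxt kk (j + 1)) (nxt.getD j 0 + d * ((j : Int) + 1)) := by
  unfold gAt
  have h1 : kk - j = (kk - (j + 1)) + 1 := by omega
  rw [h1, List.range'_succ, List.map_cons, List.reverse_cons, oMin, List.foldl_append]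
  rfl

theorem gAt_step (d : Int) (nxt : List Int) (kk j : Nat) :
    (if j < kk then portg (gAt d nxt kk (j + 1)) (nxt.getD j 0 + d * ((j : Int) + 1))
     else gAt d nxt kk (j + 1)) = gAt d nxt kk j := by
  by_cases hl : j < kk
  · rw [if_pos hl, portg_eq_om, ← gAt_succ d nxt kk j hl]
  · rw [if_neg hl, gAt_ge d nxt kk (j + 1) (by omega), gAt_ge d nxt kk j (by omega)]

theorem rowAuxB_spec (d : Int) (nxt : List Int) (kk : Nat) :
    ∀ j : Nat, ∀ acc : List Int,
      rowAuxB d nxt kk j (gAt d nxt kk (j + 1)) acc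
      = (List.range' 0 (j + 1)).map (bestAt d nxt kk) ++ acc := by
  intro j
  induction j with
  | zero =>
      intro acc
      simp only [rowAuxB]
      rw [gAt_step d nxt kk 0]
      rfl
  | succ jp ih =>
      intro acc
      simp only [rowAuxB]
      rw [gAt_step d nxt kk (jp + 1)]
      rw [ih]
      conv_rhs => rw [List.range'_1_concat]
      simp [bestAt]

theorem rowB_getD (d : Int) (nxt : List Int) (kk : Nat) (j : Nat) (hj : j ≤ kk) :
    (rowB d nxt kk).getD j 0 = bestAt d nxt kk j := by
  unfold rowB
  rw [show (none : Option Int) = gAt d nxt kk (kk + 1) from (gAt_ge d nxt kk (kk + 1) (by omega)).symm]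
  rw [rowAuxB_spec d nxt kk kk]
  have hlen : j < ((List.range' 0 (kk + 1)).map (bestAt d nxt kk) ++ []).length := by
    simp [List.length_range']; omega
  rw [List.getD_eq_getElem _ _ hlen]
  simp [List.getElem_range' ]

-- ==== B-side: each row entry equals Fref, hence the whole table ====

theorem b1_eq (k : Int) (cs nxt : List Int) (j : Nat)
    (hsucc : ∀ jp, j = jp + 1 → nxt.getD jp 0 = Fref k cs (jp : Int)) :
    (if 0 < j then min 1061109567 (nxt.getD (j - 1) 0) else (1061109567 : Int))
    = (if 0 < (j : Int) then min 1061109567 (Fref k cs ((j : Int) - 1)) else (1061109567 : Int)) := by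
  cases j with
  | zero => norm_num
  | succ jp =>
      rw [if_pos (Nat.succ_pos jp), if_pos (by positivity), Nat.add_sub_cancel, hsucc jp rfl]
      have h1 : ((jp + 1 : Nat) : Int) - 1 = (jp : Int) := by push_cast; ring
      rw [h1]

theorem bestAt_eq (k : Int) (hk : 0 ≤ k) (d : Int) (cs : List Int) (nxt : List Int)
    (hnxt : ∀ jn : Nat, jn ≤ k.toNat → nxt.getD jn 0 = Fref k cs (jn : Int)) :
    ∀ j : Nat, j ≤ k.toNat → bestAt d nxt k.toNat j = Fref k (d :: cs) (j : Int) := by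
  intro j hj
  rw [Fref]
  rw [show (fun (a : Int) (x : Int) => min a (Fref k cs ((j : Int) + x - 1) + d * x))
      = (fun (a : Int) (x : Int) => min a ((fun x : Int => Fref k cs ((j : Int) + x - 1) + d * x) x))
    from rfl, ← List.foldl_map]
  rw [foldl_min_eq_oMin]
  have hL : ((PySem.List.pyRange 1 (k - (j : Int) + 1) 1).map
        (fun x : Int => Fref k cs ((j : Int) + x - 1) + d * x))
      = ((List.range' j (k.toNat - j)).map (fun y => nxt.getD y 0 + d * ((y : Int) + 1))).map
          (fun v => v - d * (j : Int)) := by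
    rw [PySem.List.pyRange_one, List.map_map, List.range'_eq_map_range, List.map_map, List.map_map]
    have hcnt : (k - (j : Int) + 1 - 1).toNat = k.toNat - j := by omega
    rw [hcnt]
    apply List.map_congr_left
    intro t ht
    rw [List.mem_range] at ht
    simp only [Function.comp]
    rw [hnxt (j + t) (by omega)]
    have harg : (j : Int) + (1 + (t : Int)) - 1 = ((j + t : Nat) : Int) := by push_cast; ring
    rw [harg]
    push_cast
    ring
  rw [hL]
  rw [oMin_map_sub]
  unfold bestAt gAt
  rw [oMin_reverse]
  rw [← b1_eq k cs nxt j (fun jp hjp => hnxt jp (by omega))]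
  cases hm : oMin ((List.range' j (k.toNat - j)).map (fun y => nxt.getD y 0 + d * ((y : Int) + 1))) with
  | none => rfl
  | some v => rfl

theorem buildB_getD (k : Int) (hk : 0 ≤ k) :
    ∀ (cs : List Int) (j : Nat), j ≤ k.toNat →
      (buildB k.toNat cs).getD j 0 = Fref k cs (j : Int) := by
  intro cs
  induction cs with
  | nil =>
      intro j hj
      rw [buildB, List.getD_eq_getElem _ _ (by simp; omega), List.getElem_replicate]
      simp [Fref]
  | cons c cs ih =>
      intro j hj
      rw [buildB, rowB_getD c (buildB k.toNat cs) k.toNat j hj]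
      exact bestAt_eq k hk c cs (buildB k.toNat cs) ih j hj

-- ===== VERDICT (by name: the statement is the Claim_ definition above) =====
theorem solution_spec : Claim_equal_solution := by
  intro n k data _hdom hpre
  unfold Spec_solution solution solution_alt
  by_cases hn : n ≤ 0
  · rw [dfsA, dif_pos (by omega : n ≤ (0 : Int)), if_pos hn]
  · rw [if_neg hn]
    by_cases hk : k ≤ 0
    · rw [if_pos hk, dfsA, dif_neg (by omega : ¬ n ≤ (0 : Int))]
      rw [PySem.List.pyRange_one_eq_nil (by omega)]
      norm_num
    · rw [if_neg hk]
      have hlen : n ≤ (data.length : Int) := by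
        rcases hpre with h | h | h
        · omega
        · omega
        · exact h
      rw [dfsA_eq n k data hlen (n - 0).toNat 0 0 (le_refl _) (le_refl _) (le_refl _) (by omega)]
      rw [buildB_getD k (by omega) (data.take n.toNat) 0 (by omega)]
      simp
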